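-- pv_equiv track=rewrite | github.com/Zealina/HNG-number_api | app.py | properties
-- ===== SOURCE A (Python) =====
-- from typing import List
--
-- def properties(value: int) -> List:
--     """
--     Description: Check parity of number and if number is armstrong.
--
--     - Parity of a number is its attribute of being an even or odd number
--     for more info visit https://en.wikipedia.org/wiki/Parity_(mathematics)
--
--     - An armstrong number is a natural number such that the sum of each of its
--     digits raised to the power of number of digits in the number is equal to
--     the number itself e.g 153
--         Number of digits: 153 has 3 digits.
--         Calculation: 1^3 + 5^3 + 3^3 = 1 + 125 + 27 = 153.
--     for further reading visit https://en.wikipedia.org/wiki/Narcissistic_number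
--
--     Return: A list with the parity, armstrong if number is armstrong
--     """
--     my_list = ["odd" if value % 2 == 1 else "even"]
--     if value < 1:
--         return my_list
--     total = 0
--     temp = value
--     count = 0
--     while temp > 0:  # Number of digits in value
--         count += 1
--         temp //= 10
--     temp = value
--     while temp > 0:  # Raise to power of count and add to running total
--         total += (temp % 10) ** count
--         temp //= 10
--     if total == value:
--         my_list.append("armstrong")
--     return my_list
-- ===== SOURCE B (Python) =====
-- from typing import List
--
-- def properties(value: int) -> List:
--     my_list = ["odd" if value % 2 == 1 else "even"]
--     if value < 1:
--         return my_list
--     s = str(value)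
--     count = len(s)
--     if sum(int(d) ** count for d in s) == value:
--         my_list.append("armstrong")
--     return my_list
-- ===== Notes on version B (the rewrite author's own statement) =====
-- stated objective: idiomatic
-- what changed: Replaces the two arithmetic while-loops (digit counting by //10, then summing digit**count by %10) with the decimal string representation: count = len(str(value)) and one sum over its characters.
import Mathlib
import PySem

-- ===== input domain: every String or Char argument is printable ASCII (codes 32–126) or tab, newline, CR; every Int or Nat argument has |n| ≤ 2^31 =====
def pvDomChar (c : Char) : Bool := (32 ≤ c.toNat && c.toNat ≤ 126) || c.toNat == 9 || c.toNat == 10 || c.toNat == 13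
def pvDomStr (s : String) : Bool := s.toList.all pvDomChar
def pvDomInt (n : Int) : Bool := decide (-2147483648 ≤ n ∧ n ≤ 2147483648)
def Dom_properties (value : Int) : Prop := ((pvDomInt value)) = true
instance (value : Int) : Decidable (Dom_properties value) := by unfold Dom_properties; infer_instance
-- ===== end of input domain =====

-- B replaces A's two digit-extraction while-loops with one traversal of the decimal string
-- representation (idiomatic; same asymptotic cost).


-- ===== PORT A =====
-- while temp > 0: count += 1; temp //= 10
def countLoopA (temp count : Int) : Int :=
  if h : 0 < temp then countLoopA (PySem.Int.floordiv temp 10) (count + 1) else count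
termination_by temp.toNat
decreasing_by
  have := PySem.Int.floordiv_lt_iff_lt_mul (a := temp) (q := temp) (b := (10:Int)) (by omega)
  have h2 : PySem.Int.floordiv temp 10 < temp := this.mpr (by omega)
  have h3 : 0 ≤ PySem.Int.floordiv temp 10 := by
    have := PySem.Int.le_floordiv_iff_mul_le (a := temp) (q := 0) (b := (10:Int)) (by omega)
    exact this.mpr (by omega)
  omega

-- while temp > 0: total += (temp % 10) ** count; temp //= 10
-- (Python int ** int with nonnegative exponent; count ≥ 0 here, ported as ^ count.toNat)
def sumLoopA (temp count total : Int) : Int :=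
  if h : 0 < temp then
    sumLoopA (PySem.Int.floordiv temp 10) count (total + (PySem.Int.mod temp 10) ^ count.toNat)
  else total
termination_by temp.toNat
decreasing_by
  have := PySem.Int.floordiv_lt_iff_lt_mul (a := temp) (q := temp) (b := (10:Int)) (by omega)
  have h2 : PySem.Int.floordiv temp 10 < temp := this.mpr (by omega)
  have h3 : 0 ≤ PySem.Int.floordiv temp 10 := by
    have := PySem.Int.le_floordiv_iff_mul_le (a := temp) (q := 0) (b := (10:Int)) (by omega)
    exact this.mpr (by omega)
  omega

def properties (value : Int) : List String :=
  let myList := [if PySem.Int.mod value 2 = 1 then "odd" else "even"]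
  if value < 1 then myList
  else
    let count := countLoopA value 0
    let total := sumLoopA value count 0
    if total = value then myList ++ ["armstrong"] else myList

-- ===== PORT B =====
def properties_alt (value : Int) : List String :=
  let myList := [if PySem.Int.mod value 2 = 1 then "odd" else "even"]
  if value < 1 then myList
  else
    let s := PySem.Int.toChars value      -- str(value), exact
    let count := s.length                  -- len(s)
    -- int(d) for a decimal digit character d is its code minus 48 (exact: s here is all digits)
    if (s.map (fun c => ((c.toNat : Int) - 48) ^ count)).sum = value then
      myList ++ ["armstrong"]
    else myList

-- ===== PRECONDITION & SPEC =====
def Spec_properties (value : Int) (out : List String) : Prop := out = properties_alt value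
instance (value : Int) (out : List String) : Decidable (Spec_properties value out) := by unfold Spec_properties; infer_instance

-- ===== CLAIM (what is proved, stated in full; the proofs are below) =====
def Claim_equal_properties : Prop := ∀ (value : Int), Dom_properties value → Spec_properties value (properties value)

-- ===== LEMMAS AND PROOFS =====

-- the big-endian decimal digit characters of n (meeting point of the two proofs)
def bigDigits (n : Nat) : List Char :=
  if h : n < 10 then [Nat.digitChar n]
  else bigDigits (n / 10) ++ [Nat.digitChar (n % 10)]
termination_by n
decreasing_by exact Nat.div_lt_self (by omega) (by omega)

lemma toDigitsCore_eq_bigDigits : ∀ (f n : Nat) (l : List Char), n ≤ f →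
    Nat.toDigitsCore 10 (f + 1) n l = bigDigits n ++ l := by
  intro f
  induction f with
  | zero =>
    intro n l hn
    have : n = 0 := by omega
    subst this
    simp [Nat.toDigitsCore, bigDigits]
  | succ f ih =>
    intro n l hn
    by_cases h : n < 10
    · have h10 : n / 10 = 0 := Nat.div_eq_of_lt h
      have hm : n % 10 = n := Nat.mod_eq_of_lt h
      simp [Nat.toDigitsCore, h10, hm, bigDigits, h]
    · have h10 : n / 10 ≠ 0 := by
        intro hc; have := Nat.div_eq_of_lt (by omega : n < 10 * 1) |>.symm; omega
      have hle : n / 10 ≤ f := by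
        have := Nat.div_lt_self (by omega : 0 < n) (by omega : 1 < 10); omega
      conv_lhs => rw [Nat.toDigitsCore]
      rw [if_neg h10]
      rw [ih (n / 10) (Nat.digitChar (n % 10) :: l) hle]
      conv_rhs => rw [bigDigits]
      rw [dif_neg h]; simp

lemma toDigits_eq_bigDigits (n : Nat) : Nat.toDigits 10 n = bigDigits n := by
  have := toDigitsCore_eq_bigDigits n n [] (le_refl n)
  simpa [Nat.toDigits] using this

lemma digitChar_toNat (d : Nat) (h : d < 10) : (Nat.digitChar d).toNat = 48 + d := by
  interval_cases d <;> decide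

lemma floordiv_cast (n : Nat) : PySem.Int.floordiv (n : Int) 10 = ((n / 10 : Nat) : Int) := by
  exact_mod_cast PySem.Int.floordiv_natCast n 10

lemma mod_cast10 (n : Nat) : PySem.Int.mod (n : Int) 10 = ((n % 10 : Nat) : Int) := by
  exact_mod_cast PySem.Int.mod_natCast n 10

lemma countLoopA_eq (n : Nat) (h : 0 < n) : ∀ c : Int,
    countLoopA (n : Int) c = c + ((bigDigits n).length : Int) := by
  induction n using Nat.strong_induction_on with
  | _ n ih =>
    intro c
    rw [countLoopA]
    rw [dif_pos (by exact_mod_cast h)]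
    rw [floordiv_cast]
    by_cases h10 : n < 10
    · have : n / 10 = 0 := Nat.div_eq_of_lt h10
      rw [this]
      rw [countLoopA, dif_neg (by norm_num)]
      rw [bigDigits]; simp [h10]
    · have hlt : n / 10 < n := Nat.div_lt_self h (by omega)
      have hpos : 0 < n / 10 := Nat.div_pos (by omega) (by omega)
      rw [ih (n / 10) hlt hpos (c + 1)]
      conv_rhs => rw [bigDigits]
      rw [dif_neg h10]
      simp only [List.length_append, List.length_cons, List.length_nil]
      push_cast; ring

lemma sumLoopA_eq (n : Nat) (h : 0 < n) : ∀ (k t : Int),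
    sumLoopA (n : Int) k t
      = t + ((bigDigits n).map (fun c => ((c.toNat : Int) - 48) ^ k.toNat)).sum := by
  induction n using Nat.strong_induction_on with
  | _ n ih =>
    intro k t
    rw [sumLoopA]
    rw [dif_pos (by exact_mod_cast h)]
    rw [floordiv_cast, mod_cast10]
    by_cases h10 : n < 10
    · have hd : n / 10 = 0 := Nat.div_eq_of_lt h10
      have hm : n % 10 = n := Nat.mod_eq_of_lt h10
      rw [hd, hm]
      rw [sumLoopA, dif_neg (by norm_num)]
      rw [bigDigits]; simp only [dif_pos h10]
      simp only [List.map_cons, List.map_nil, List.sum_cons, List.sum_nil]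
      rw [digitChar_toNat n h10]
      push_cast; ring
    · have hlt : n / 10 < n := Nat.div_lt_self h (by omega)
      have hpos : 0 < n / 10 := Nat.div_pos (by omega) (by omega)
      rw [ih (n / 10) hlt hpos k (t + ((n % 10 : Nat) : Int) ^ k.toNat)]
      conv_rhs => rw [bigDigits]
      rw [dif_neg h10]
      rw [List.map_append, List.sum_append]
      simp only [List.map_cons, List.map_nil, List.sum_cons, List.sum_nil]
      rw [digitChar_toNat (n % 10) (Nat.mod_lt _ (by omega))]
      push_cast; ring

lemma toChars_pos (value : Int) (h : ¬ value < 1) :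
    PySem.Int.toChars value = bigDigits value.toNat := by
  rw [PySem.Int.toChars, if_neg (by omega), toDigits_eq_bigDigits]

-- ===== VERDICT (by name: the statement is the Claim_ definition above) =====
theorem properties_spec : Claim_equal_properties := by
  intro value _
  unfold Spec_properties properties properties_alt
  by_cases hlt : value < 1
  · simp [hlt]
  · simp only [if_neg hlt]
    have hn : (0:Int) < value := by omega
    have hcast : ((value.toNat : Nat) : Int) = value := Int.toNat_of_nonneg (by omega)
    have hpos : 0 < value.toNat := by omega
    rw [toChars_pos value hlt]
    have hcount : countLoopA value 0 = ((bigDigits value.toNat).length : Int) := by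
      conv_lhs => rw [← hcast]
      rw [countLoopA_eq value.toNat hpos 0]; ring
    have htot : ∀ L : Nat, sumLoopA value ((L : Int)) 0
        = ((bigDigits value.toNat).map
            (fun c => ((c.toNat : Int) - 48) ^ L)).sum := by
      intro L
      conv_lhs => rw [← hcast]
      rw [sumLoopA_eq value.toNat hpos]
      simp
    rw [hcount, htot]
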